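-- pv_equiv track=rewrite | github.com/Jordan-pseudo/sat-prep-question-bank | src/scoring.py | score_responses
-- ===== SOURCE A (Python) =====
-- def score_responses(responses):
--     total = len(responses)
--     correct_count = 0
--     topic_stats = {}
--
--     for r in responses:
--         is_correct = r["chosen"] == r["correct"]
--         if is_correct:
--             correct_count += 1
--
--         topic = r.get("topic", "Unknown")
--         if topic not in topic_stats:
--             topic_stats[topic] = {"correct": 0, "total": 0}
--
--         topic_stats[topic]["total"] += 1
--         if is_correct:
--             topic_stats[topic]["correct"] += 1
--
--     return correct_count, total, topic_stats
-- ===== SOURCE B (Python) =====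
-- def score_responses(responses):
--     # Two-phase: tally topics first, then assemble the per-topic stats table.
--     topics = [r.get("topic", "Unknown") for r in responses]
--     correct_topics = [t for t, r in zip(topics, responses)
--                       if r["chosen"] == r["correct"]]
--     tot = {}
--     for t in topics:
--         tot[t] = tot.get(t, 0) + 1
--     corr = {}
--     for t in correct_topics:
--         corr[t] = corr.get(t, 0) + 1
--     topic_stats = {t: {"correct": corr.get(t, 0), "total": n}
--                    for t, n in tot.items()}
--     return len(correct_topics), len(responses), topic_stats
-- ===== Notes on version B (the rewrite author's own statement) =====
-- stated objective: alternative
-- what changed: A's single loop that interleaves counting, dict-initialisation and per-topic mutation is replaced by a two-phase aggregation: first tally all topics and the topics of correct responses into two plain counters, then assemble the per-topic stats table in a separate pass over the totals counter.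
import Mathlib
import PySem

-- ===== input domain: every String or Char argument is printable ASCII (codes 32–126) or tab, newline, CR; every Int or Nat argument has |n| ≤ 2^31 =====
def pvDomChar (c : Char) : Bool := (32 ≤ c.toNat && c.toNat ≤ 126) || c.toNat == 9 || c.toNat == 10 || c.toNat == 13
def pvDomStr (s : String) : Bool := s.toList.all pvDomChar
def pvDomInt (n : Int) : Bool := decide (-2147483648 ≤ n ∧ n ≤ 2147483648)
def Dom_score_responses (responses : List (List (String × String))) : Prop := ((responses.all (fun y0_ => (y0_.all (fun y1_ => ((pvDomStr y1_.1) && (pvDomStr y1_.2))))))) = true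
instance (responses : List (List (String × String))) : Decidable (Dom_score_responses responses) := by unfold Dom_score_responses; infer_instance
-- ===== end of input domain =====

-- B restructures A's single interleaved loop into two aggregate tallies (a counter of all
-- topics and a counter of topics of correct responses) assembled into the stats table in a
-- separate pass; objective: alternative decomposition, same exact results.

-- ===== PORT A =====
-- the body of A's for-loop: state = (correct_count, topic_stats)
def aStep (acc : Int × PySem.Dict String (PySem.Dict String Int)) (r : List (String × String)) :
    Int × PySem.Dict String (PySem.Dict String Int) :=
  let rd := PySem.Dict.ofList r
  let is_correct := rd.get? "chosen" == rd.get? "correct"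
  let cc := if is_correct then acc.1 + 1 else acc.1
  let topic := rd.getD "topic" "Unknown"
  let ts := if acc.2.contains topic then acc.2
            else acc.2.insert topic (PySem.Dict.ofList [("correct", (0 : Int)), ("total", (0 : Int))])
  let ts := ts.modify topic PySem.Dict.empty (fun dd => dd.modify "total" 0 (· + 1))
  let ts := if is_correct then ts.modify topic PySem.Dict.empty (fun dd => dd.modify "correct" 0 (· + 1)) else ts
  (cc, ts)

def score_responses (responses : List (List (String × String))) : Int × Int × (List (String × List (String × Int))) :=
  let total : Int := responses.length
  let res := responses.foldl aStep (0, PySem.Dict.empty)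
  (res.1, total, res.2.items.map (fun p => (p.1, p.2.items)))

-- ===== PORT B =====
def bTopic (r : List (String × String)) : String := (PySem.Dict.ofList r).getD "topic" "Unknown"

def bCount (l : List String) : PySem.Dict String Int :=
  l.foldl (fun d t => d.insert t (d.getD t 0 + 1)) PySem.Dict.empty

def score_responses_alt (responses : List (List (String × String))) : Int × Int × (List (String × List (String × Int))) :=
  let topics := responses.map bTopic
  let correct_topics := ((topics.zip responses).filter
      (fun p => (PySem.Dict.ofList p.2).get? "chosen" == (PySem.Dict.ofList p.2).get? "correct")).map (·.1)
  let tot := bCount topics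
  let corr := bCount correct_topics
  let topic_stats := tot.items.map (fun p => (p.1, [("correct", corr.getD p.1 0), ("total", p.2)]))
  ((correct_topics.length : Int), (responses.length : Int), topic_stats)

-- ===== PRECONDITION & SPEC =====
-- Pre_ excludes exactly the responses missing a "chosen" or "correct" key, on which the Python A
-- raises KeyError (it returns on everything else; the "topic" key may be absent).
def Pre_score_responses (responses : List (List (String × String))) : Prop :=
  (responses.all (fun r => (PySem.Dict.ofList r).contains "chosen" && (PySem.Dict.ofList r).contains "correct")) = true
instance (responses : List (List (String × String))) : Decidable (Pre_score_responses responses) := by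
  unfold Pre_score_responses; infer_instance

def pvWitness_score_responses : (List (List (String × String))) :=
  [[("chosen", "A"), ("correct", "A"), ("topic", "Algebra")],
   [("chosen", "B"), ("correct", "C")],
   [("chosen", "D"), ("correct", "D")]]

def Spec_score_responses (responses : List (List (String × String))) (out : Int × Int × (List (String × List (String × Int)))) : Prop := out = score_responses_alt responses
instance (responses : List (List (String × String))) (out : Int × Int × (List (String × List (String × Int)))) : Decidable (Spec_score_responses responses out) := by unfold Spec_score_responses; infer_instance

-- ===== CLAIM (what is proved, stated in full; the proofs are below) =====
def Claim_equal_score_responses : Prop := ∀ (responses : List (List (String × String))), Dom_score_responses responses → Pre_score_responses responses → Spec_score_responses responses (score_responses responses)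

-- ===== LEMMAS AND PROOFS =====

def bOk (r : List (String × String)) : Bool :=
  (PySem.Dict.ofList r).get? "chosen" == (PySem.Dict.ofList r).get? "correct"

-- the two independent components of A's loop body
def aCc (cc : Int) (r : List (String × String)) : Int := if bOk r then cc + 1 else cc

def aTs (ts : PySem.Dict String (PySem.Dict String Int)) (r : List (String × String)) :
    PySem.Dict String (PySem.Dict String Int) :=
  let topic := bTopic r
  let ts := if ts.contains topic then ts
            else ts.insert topic (PySem.Dict.ofList [("correct", (0 : Int)), ("total", (0 : Int))])
  let ts := ts.modify topic PySem.Dict.empty (fun dd => dd.modify "total" 0 (· + 1))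
  if bOk r then ts.modify topic PySem.Dict.empty (fun dd => dd.modify "correct" 0 (· + 1)) else ts

lemma aStep_eq_prod : aStep = fun acc r => (aCc acc.1 r, aTs acc.2 r) := rfl

def StatsInv (ts : PySem.Dict String (PySem.Dict String Int)) (tot corr : PySem.Dict String Int) : Prop :=
  ts.items = tot.items.map (fun p => (p.1, PySem.Dict.mk [("correct", corr.getD p.1 0), ("total", p.2)]))
  ∧ tot.keys.Nodup ∧ (∀ k, corr.contains k = true → tot.contains k = true)


lemma modify_eq_insert {κ ν : Type} [BEq κ] (d : PySem.Dict κ ν) (k : κ) (d0 : ν) (f : ν → ν) :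
    d.modify k d0 f = d.insert k (f (d.getD k d0)) := rfl

def innerUpd (b : Bool) (d : PySem.Dict String Int) : PySem.Dict String Int :=
  if b then (d.modify "total" 0 (· + 1)).modify "correct" 0 (· + 1)
  else d.modify "total" 0 (· + 1)

lemma innerUpd_mk (c n : Int) (b : Bool) :
    innerUpd b (PySem.Dict.mk [("correct", c), ("total", n)])
      = PySem.Dict.mk [("correct", if b then c + 1 else c), ("total", n + 1)] := by
  cases b <;> simp [innerUpd, PySem.Dict.modify, PySem.Dict.insert, PySem.Dict.getD,
    PySem.Dict.get?, PySem.Dict.contains]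

lemma innerUpd_fresh (b : Bool) :
    innerUpd b (PySem.Dict.ofList [("correct", (0 : Int)), ("total", (0 : Int))])
      = PySem.Dict.mk [("correct", if b then 1 else 0), ("total", 1)] := by
  cases b <;> decide

lemma aTs_eq (ts : PySem.Dict String (PySem.Dict String Int)) (r : List (String × String)) :
    aTs ts r = ts.insert (bTopic r)
      (innerUpd (bOk r) (if ts.contains (bTopic r) = true then ts.getD (bTopic r) PySem.Dict.empty
                         else PySem.Dict.ofList [("correct", (0 : Int)), ("total", (0 : Int))])) := by
  by_cases hb : bOk r = true <;> by_cases hc : ts.contains (bTopic r) = true <;>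
    simp [aTs, innerUpd, hb, hc, modify_eq_insert,
      PySem.Dict.getD_insert_self, PySem.Dict.insert_insert_self]

theorem step_inv (ts : PySem.Dict String (PySem.Dict String Int)) (tot corr : PySem.Dict String Int)
    (r : List (String × String)) (h : StatsInv ts tot corr) :
    StatsInv (aTs ts r) (tot.insert (bTopic r) (tot.getD (bTopic r) 0 + 1))
      (if bOk r then corr.insert (bTopic r) (corr.getD (bTopic r) 0 + 1) else corr) := by
  obtain ⟨hitems, hnd, hsub⟩ := h
  have htk : ts.keys = tot.keys := by
    simp only [PySem.Dict.keys, hitems, List.map_map]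
    exact List.map_congr_left fun _ _ => rfl
  have hck : ts.contains (bTopic r) = tot.contains (bTopic r) := by
    rw [PySem.Dict.contains_eq_decide_mem_keys, PySem.Dict.contains_eq_decide_mem_keys, htk]
  have hndts : ts.keys.Nodup := htk ▸ hnd
  refine ⟨?_, PySem.Dict.nodup_keys_insert _ _ _ hnd, ?_⟩
  · rw [aTs_eq, hck]
    by_cases hc : tot.contains (bTopic r) = true
    · -- the topic is already present
      obtain ⟨n, hmem⟩ : ∃ n, (bTopic r, n) ∈ tot.items := by
        have : bTopic r ∈ tot.keys := (PySem.Dict.contains_iff_mem_keys _ _).mp hc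
        simp only [PySem.Dict.keys, List.mem_map] at this
        obtain ⟨p, hp, hp1⟩ := this
        refine ⟨p.2, ?_⟩
        rw [← hp1]
        simpa using hp
      have hn : tot.getD (bTopic r) 0 = n := PySem.Dict.getD_of_mem_items _ hmem hnd 0
      have htsmem : (bTopic r, PySem.Dict.mk [("correct", corr.getD (bTopic r) 0), ("total", n)]) ∈ ts.items := by
        rw [hitems]; exact List.mem_map.mpr ⟨(bTopic r, n), hmem, rfl⟩
      have htsg : ts.getD (bTopic r) PySem.Dict.empty
          = PySem.Dict.mk [("correct", corr.getD (bTopic r) 0), ("total", n)] :=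
        PySem.Dict.getD_of_mem_items _ htsmem hndts _
      have hcts : ts.contains (bTopic r) = true := hck.trans hc
      rw [if_pos hc, htsg, innerUpd_mk,
        PySem.Dict.items_insert_of_contains _ _ hcts,
        PySem.Dict.items_insert_of_contains _ _ hc,
        hitems, List.map_map, List.map_map]
      refine List.map_congr_left fun p hp => ?_
      by_cases hpt : p.1 = bTopic r
      · have hp2 : p.2 = n := by
          have hp' : (bTopic r, p.2) ∈ tot.items := by
            rw [← hpt]; simpa using hp
          have := PySem.Dict.getD_of_mem_items tot hp' hnd 0
          rw [hn] at this; omega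
        subst hp2
        cases hb : bOk r <;>
          simp [hpt, hn, PySem.Dict.getD_insert]
      · cases hb : bOk r with
        | false => simp [hpt]
        | true => simp [hpt, PySem.Dict.getD_insert]
    · -- fresh topic
      have hcts : ts.contains (bTopic r) = false := by rw [hck]; exact eq_false_of_ne_true hc
      have hcorrt : corr.contains (bTopic r) = false := by
        by_contra hx
        exact hc (hsub _ (eq_true_of_ne_false hx))
      have hc' : tot.contains (bTopic r) = false := eq_false_of_ne_true hc
      rw [if_neg hc, innerUpd_fresh,
        PySem.Dict.items_insert_of_not_contains _ _ hcts,
        PySem.Dict.items_insert_of_not_contains _ _ hc',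
        List.map_append, hitems,
        PySem.Dict.getD_of_not_contains _ _ hc',
        PySem.Dict.getD_of_not_contains _ _ hcorrt]
      congr 1
      · refine List.map_congr_left fun p hp => ?_
        have hpt : p.1 ≠ bTopic r := by
          intro hx
          have : bTopic r ∈ tot.keys := hx ▸ PySem.Dict.mem_keys_of_mem_items _ hp
          rw [PySem.Dict.contains_eq_decide_mem_keys] at hc'
          simp only [decide_eq_false_iff_not] at hc'
          exact hc' this
        cases hb : bOk r with
        | false => simp
        | true => simp [hpt, PySem.Dict.getD_insert]
      · cases hb : bOk r <;>
          simp [PySem.Dict.getD_insert_self, PySem.Dict.getD_of_not_contains _ _ hcorrt]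
  · intro k hk
    rw [PySem.Dict.contains_insert]
    by_cases hkt : k = bTopic r
    · simp [hkt]
    · cases hb : bOk r with
      | false =>
        rw [hb] at hk; simp only [Bool.false_eq_true, if_false] at hk
        simp [hsub k hk]
      | true =>
        rw [hb] at hk; simp only [if_true, PySem.Dict.contains_insert] at hk
        rcases Bool.or_eq_true_iff.mp hk with h1 | h2
        · exact absurd (by simpa using h1) hkt
        · simp [hsub k h2]

theorem loop_inv (l : List (List (String × String))) (ts : PySem.Dict String (PySem.Dict String Int))
    (tot corr : PySem.Dict String Int) (h : StatsInv ts tot corr) :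
    StatsInv (l.foldl aTs ts)
      (l.foldl (fun d r => d.insert (bTopic r) (d.getD (bTopic r) 0 + 1)) tot)
      (l.foldl (fun d r => if bOk r then d.insert (bTopic r) (d.getD (bTopic r) 0 + 1) else d) corr) := by
  induction l generalizing ts tot corr with
  | nil => exact h
  | cons a l ih => exact ih _ _ _ (step_inv _ _ _ _ h)

lemma zip_filter_map {α β : Type} (f : α → β) (g : α → Bool) (l : List α) :
    (((l.map f).zip l).filter (fun p => g p.2)).map (·.1) = (l.filter g).map f := by
  induction l with
  | nil => rfl
  | cons a l ih =>
    by_cases h : g a = true <;> simp [List.filter, h, ih]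

-- ===== VERDICT (by name: the statement is the Claim_ definition above) =====
theorem score_responses_spec : Claim_equal_score_responses := by
  intro responses _ _
  unfold Spec_score_responses score_responses score_responses_alt
  simp only [aStep_eq_prod, PySem.List.foldl_prod_mk]
  have hct : ((((responses.map bTopic).zip responses).filter
      (fun p => (PySem.Dict.ofList p.2).get? "chosen" == (PySem.Dict.ofList p.2).get? "correct")).map (·.1))
      = (responses.filter bOk).map bTopic := zip_filter_map bTopic bOk responses
  rw [hct]
  have hinv := loop_inv responses PySem.Dict.empty PySem.Dict.empty PySem.Dict.empty
    (by refine ⟨rfl, ?_, ?_⟩ <;> simp [PySem.Dict.keys_empty, PySem.Dict.contains_empty])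
  have htot : (bCount (responses.map bTopic))
      = responses.foldl (fun d r => d.insert (bTopic r) (d.getD (bTopic r) 0 + 1)) PySem.Dict.empty := by
    unfold bCount; rw [List.foldl_map]
  have hcorr : (bCount ((responses.filter bOk).map bTopic))
      = responses.foldl (fun d r => if bOk r then d.insert (bTopic r) (d.getD (bTopic r) 0 + 1) else d) PySem.Dict.empty := by
    unfold bCount; rw [List.foldl_map, List.foldl_filter]
  rw [htot, hcorr]
  obtain ⟨hitems, -, -⟩ := hinv
  refine Prod.ext ?_ (Prod.ext rfl ?_)
  · show List.foldl aCc 0 responses = _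
    unfold aCc
    rw [PySem.List.foldl_count_if bOk responses 0]
    simp [List.countP_eq_length_filter]
  · show (List.foldl aTs PySem.Dict.empty responses).items.map (fun p => (p.1, p.2.items)) = _
    rw [hitems, List.map_map]
    rfl
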